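-- pv_equiv track=rewrite | github.com/HaneulJung/Programmers | Programmers/Lv. 2/롤케이크 자르기.py | solution
-- ===== SOURCE A (Python) =====
-- def solution(topping):
--     answer = 0
--
--     older = set()
--     younger = {}
--
--     for t in topping:
--         if t not in younger.keys():
--             younger[t] = 1
--         else:
--             younger[t] += 1
--
--     for t in topping:
--         older.add(t)
--         younger[t] -= 1
--
--         if younger[t] == 0:
--             del younger[t]
--
--         if len(older) == len(younger):
--             answer += 1
--
--     return answer
-- ===== SOURCE B (Python) =====
-- def solution(topping):
--     n = len(topping)
--     right = [0] * (n + 1)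
--     seen = set()
--     for i in range(n - 1, -1, -1):
--         seen.add(topping[i])
--         right[i] = len(seen)
--     answer = 0
--     left = set()
--     for i, t in enumerate(topping):
--         left.add(t)
--         if len(left) == right[i + 1]:
--             answer += 1
--     return answer
-- ===== Notes on version B (the rewrite author's own statement) =====
-- stated objective: alternative
-- what changed: Replaces the live-decremented frequency dict with a precomputed suffix-distinct table: one backward pass records the number of distinct toppings in every suffix, then a forward pass with a prefix set compares against the table entry.
import Mathlib
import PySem

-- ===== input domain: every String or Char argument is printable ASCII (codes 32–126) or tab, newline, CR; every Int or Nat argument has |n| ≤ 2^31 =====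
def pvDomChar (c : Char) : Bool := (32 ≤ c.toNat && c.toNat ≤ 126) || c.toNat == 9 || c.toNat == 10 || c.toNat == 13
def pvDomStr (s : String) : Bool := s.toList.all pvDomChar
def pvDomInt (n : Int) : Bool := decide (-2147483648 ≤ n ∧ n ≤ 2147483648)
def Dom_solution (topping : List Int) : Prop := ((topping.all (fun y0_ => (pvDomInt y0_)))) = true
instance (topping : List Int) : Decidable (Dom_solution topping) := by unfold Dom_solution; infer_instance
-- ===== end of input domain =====

-- B replaces A's live-decremented frequency dict by a precomputed suffix-distinct table plus a forward prefix set (alternative decomposition, same cost).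

-- ===== PORT A =====
-- first loop: build the frequency dict 'younger' of the whole list
def aCount (topping : List Int) : PySem.Dict Int Int :=
  topping.foldl
    (fun d t => if t ∉ d.keys then d.insert t 1 else d.modify t 0 (fun v => v + 1))
    PySem.Dict.empty

-- body of the second loop: state = (answer, older, younger)
def aStep (st : Int × PySem.Set Int × PySem.Dict Int Int) (t : Int) :
    Int × PySem.Set Int × PySem.Dict Int Int :=
  let older := PySem.Set.add st.2.1 t
  let y := st.2.2.modify t 0 (fun v => v - 1)
  let y := if y.getD t 0 = 0 then y.erase t else y
  (if older.length = y.size then st.1 + 1 else st.1, older, y)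

def solution (topping : List Int) : Int :=
  (topping.foldl aStep (0, PySem.Set.empty, aCount topping)).1

-- ===== PORT B =====
-- backward pass 'for i in range(n-1, -1, -1)': returns (seen, right) where right[i] = distinct count of topping[i:]
def rightTable : List Int → PySem.Set Int × List Int
  | [] => (PySem.Set.empty, [(0 : Int)])
  | t :: rest =>
      let (s, tbl) := rightTable rest
      let s' := PySem.Set.add s t
      (s', ((s'.length : Int)) :: tbl)

-- body of the forward loop: state = (answer, left); p = (t, right[i+1])
def bStep (st : Int × PySem.Set Int) (p : Int × Int) : Int × PySem.Set Int :=
  let left := PySem.Set.add st.2 p.1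
  (if (left.length : Int) = p.2 then st.1 + 1 else st.1, left)

def solution_alt (topping : List Int) : Int :=
  ((topping.zip ((rightTable topping).2.drop 1)).foldl bStep (0, PySem.Set.empty)).1

-- ===== PRECONDITION & SPEC =====
def Spec_solution (topping : List Int) (out : Int) : Prop := out = solution_alt topping
instance (topping : List Int) (out : Int) : Decidable (Spec_solution topping out) := by unfold Spec_solution; infer_instance

-- ===== CLAIM (what is proved, stated in full; the proofs are below) =====
def Claim_equal_solution : Prop := ∀ (topping : List Int), Dom_solution topping → Spec_solution topping (solution topping)

-- ===== LEMMAS AND PROOFS =====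

-- number of distinct elements
def sdc (l : List Int) : Nat := (PySem.Set.ofList l).length

-- common specification: cnt p s counts, over the splits of s, how often
-- sdc (prefix so far ++ next element) = sdc (rest)
def cnt : List Int → List Int → Int
  | _, [] => 0
  | p, t :: s => cnt (p ++ [t]) s + (if sdc (p ++ [t]) = sdc s then 1 else 0)

lemma sdc_perm {l l' : List Int} (h : l.Perm l') : sdc l = sdc l' := by
  unfold sdc
  refine List.Perm.length_eq ?_
  rw [List.perm_ext_iff_of_nodup (PySem.Set.nodup_ofList l) (PySem.Set.nodup_ofList l')]
  intro a
  rw [PySem.Set.mem_ofList, PySem.Set.mem_ofList]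
  exact ⟨fun hm => h.mem_iff.mp hm, fun hm => h.mem_iff.mpr hm⟩

lemma ofList_append_singleton (p : List Int) (t : Int) :
    PySem.Set.ofList (p ++ [t]) = PySem.Set.add (PySem.Set.ofList p) t := by
  rw [PySem.Set.ofList_eq_foldl, PySem.Set.ofList_eq_foldl, List.foldl_append]
  rfl

-- erase lemmas (PySem has none for Dict.erase)
lemma find?_filter_ne (k k' : Int) (items : List (Int × Int)) :
    (items.filter (fun p => !(p.1 == k))).find? (fun p => p.1 == k') =
      if k' = k then none else items.find? (fun p => p.1 == k') := by
  induction items with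
  | nil => simp
  | cons hd tl ih =>
      by_cases h' : k' = k
      · subst h'
        by_cases hk : hd.1 = k' <;> simp [hk, ih]
      · by_cases hk : hd.1 = k
        · have hne : (k == k') = false := beq_eq_false_iff_ne.mpr (fun e => h' e.symm)
          simp [hk, ih, h', hne]
        · simp [hk, List.find?_cons, ih, h']

lemma get?_erase (d : PySem.Dict Int Int) (k k' : Int) :
    (d.erase k).get? k' = if k' = k then none else d.get? k' := by
  show ((d.items.filter (fun p => !(p.1 == k))).find? (fun p => p.1 == k')).map (·.2)
      = if k' = k then none else (d.items.find? (fun p => p.1 == k')).map (·.2)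
  rw [find?_filter_ne]
  split <;> rfl

lemma nodup_keys_erase (d : PySem.Dict Int Int) (k : Int) (h : d.keys.Nodup) :
    (d.erase k).keys.Nodup := by
  have hs : (d.erase k).keys.Sublist d.keys :=
    List.Sublist.map _ (List.filter_sublist (l := d.items))
  exact h.sublist hs

-- the dict update performed by one iteration of A's second loop
def yUpd (d : PySem.Dict Int Int) (t : Int) : PySem.Dict Int Int :=
  let y := d.modify t 0 (fun v => v - 1)
  if y.getD t 0 = 0 then y.erase t else y

-- invariant: d is exactly the counter of the remaining suffix s
def CtrInv (d : PySem.Dict Int Int) (s : List Int) : Prop :=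
  d.keys.Nodup ∧ ∀ t : Int, d.get? t = if 0 < s.count t then some (s.count t : Int) else none

lemma size_of_inv {d : PySem.Dict Int Int} {s : List Int} (h : CtrInv d s) :
    d.size = sdc s := by
  obtain ⟨hnd, hg⟩ := h
  have hsz : d.size = d.keys.length := (List.length_map _).symm
  rw [hsz]
  unfold sdc
  refine List.Perm.length_eq ?_
  rw [List.perm_ext_iff_of_nodup hnd (PySem.Set.nodup_ofList s)]
  intro a
  rw [PySem.Set.mem_ofList, ← PySem.Dict.contains_iff_mem_keys d a,
      PySem.Dict.contains_eq_isSome_get?, hg a]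
  constructor
  · intro hsome
    by_cases hc : 0 < s.count a
    · exact List.count_pos_iff.mp hc
    · simp [hc] at hsome
  · intro ha
    simp [List.count_pos_iff.mpr ha]

lemma inv_yupd {d : PySem.Dict Int Int} {t : Int} {s : List Int}
    (h : CtrInv d (t :: s)) : CtrInv (yUpd d t) s := by
  obtain ⟨hnd, hg⟩ := h
  have hmem : d.getD t 0 = ((s.count t : Int) + 1) := by
    rw [PySem.Dict.getD_eq_get?_getD, hg t]
    simp [List.count_cons_self]
  have hmod : d.modify t 0 (fun v => v - 1) = d.insert t (s.count t : Int) := by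
    show d.insert t (d.getD t 0 - 1) = _
    rw [hmem]; ring_nf
  have hgety : ∀ k : Int, (d.modify t 0 (fun v => v - 1)).get? k =
      if k = t then some (s.count t : Int) else d.get? k := by
    intro k
    rw [hmod, PySem.Dict.get?_insert]
  have hgD : (d.modify t 0 (fun v => v - 1)).getD t 0 = (s.count t : Int) := by
    rw [PySem.Dict.getD_eq_get?_getD, hgety t]; simp
  unfold yUpd
  by_cases hz : ((d.modify t 0 (fun v => v - 1)).getD t 0 = 0)
  · -- count s t = 0 : the key is deleted
    have hc0 : s.count t = 0 := by
      have := hz; rw [hgD] at this; exact_mod_cast this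
    simp only [hz, if_pos]
    constructor
    · exact nodup_keys_erase _ _ (by rw [hmod]; exact PySem.Dict.nodup_keys_insert d t _ hnd)
    · intro k
      rw [get?_erase, hgety]
      by_cases hk : k = t
      · simp [hk, hc0]
      · rw [if_neg hk, if_neg hk, hg k]
        have : (t :: s).count k = s.count k := by
          rw [List.count_cons,
            if_neg (by exact fun h => hk (beq_iff_eq.mp h).symm)]; ring
        rw [this]
  · -- count s t > 0 : the key keeps its decremented value
    have hcpos : 0 < s.count t := by
      rcases Nat.eq_zero_or_pos (s.count t) with h0 | h0
      · exact absurd (by rw [hgD, h0]; rfl) hz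
      · exact h0
    simp only [hz, ite_false]
    constructor
    · rw [hmod]; exact PySem.Dict.nodup_keys_insert d t _ hnd
    · intro k
      rw [hgety]
      by_cases hk : k = t
      · simp [hk, hcpos]
      · rw [if_neg hk, hg k]
        have : (t :: s).count k = s.count k := by
          rw [List.count_cons,
            if_neg (by exact fun h => hk (beq_iff_eq.mp h).symm)]; ring
        rw [this]

lemma a_loop (s : List Int) : ∀ (p : List Int) (a : Int) (d : PySem.Dict Int Int),
    CtrInv d s →
    (s.foldl aStep (a, PySem.Set.ofList p, d)).1 = a + cnt p s := by
  induction s with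
  | nil => intro p a d _; simp [cnt]
  | cons t s ih =>
      intro p a d hinv
      have holder : PySem.Set.add (PySem.Set.ofList p) t = PySem.Set.ofList (p ++ [t]) :=
        (ofList_append_singleton p t).symm
      have hinv' : CtrInv (yUpd d t) s := inv_yupd hinv
      have hsz : (yUpd d t).size = sdc s := size_of_inv hinv'
      have hstep : aStep (a, PySem.Set.ofList p, d) t =
          ((if sdc (p ++ [t]) = sdc s then a + 1 else a),
            PySem.Set.ofList (p ++ [t]), yUpd d t) := by
        show ((if (PySem.Set.add (PySem.Set.ofList p) t).length = (yUpd d t).size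
                then a + 1 else a),
              PySem.Set.add (PySem.Set.ofList p) t, yUpd d t) = _
        rw [holder, hsz]
        rfl
      rw [List.foldl_cons, hstep, ih (p ++ [t]) _ _ hinv']
      have hcnt : cnt p (t :: s) = cnt (p ++ [t]) s + (if sdc (p ++ [t]) = sdc s then 1 else 0) := rfl
      rw [hcnt]
      by_cases hc : sdc (p ++ [t]) = sdc s <;> simp [hc] <;> ring

-- A's first loop builds exactly the counter of the list
lemma aCount_eq_counter (topping : List Int) :
    aCount topping = PySem.Dict.counter topping := by
  unfold aCount
  rw [PySem.Dict.counter_eq_foldl]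
  refine PySem.List.foldl_congr_mem _ _ _ _ (fun d t _ => ?_)
  by_cases hm : t ∈ d.keys
  · simp [hm, PySem.Dict.modify]
  · have hc : d.contains t = false := by
      cases hcc : d.contains t
      · rfl
      · exact absurd ((PySem.Dict.contains_iff_mem_keys d t).mp hcc) hm
    have h0 : d.getD t 0 = 0 := PySem.Dict.getD_of_not_contains d 0 hc
    simp [hm, PySem.Dict.modify, h0]

lemma counter_inv (l : List Int) : CtrInv (PySem.Dict.counter l) l := by
  refine ⟨PySem.Dict.nodup_keys_counter l, fun t => ?_⟩
  by_cases hm : t ∈ l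
  · have hc : (PySem.Dict.counter l).contains t = true := by
      rw [PySem.Dict.contains_counter]; exact List.contains_iff_mem.mpr hm
    have hsome : ((PySem.Dict.counter l).get? t).isSome := by
      rw [← PySem.Dict.contains_eq_isSome_get?]; exact hc
    obtain ⟨v, hv⟩ := Option.isSome_iff_exists.mp hsome
    have : (PySem.Dict.counter l).getD t 0 = v := by
      rw [PySem.Dict.getD_eq_get?_getD, hv]; rfl
    rw [PySem.Dict.getD_counter] at this
    rw [hv, ← this, if_pos (List.count_pos_iff.mpr hm)]
  · have hc : (PySem.Dict.counter l).contains t = false := by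
      rw [PySem.Dict.contains_counter]
      exact Bool.not_eq_true _ ▸ (by simpa using hm)
    rw [(PySem.Dict.get?_eq_none_iff_contains _ _).mpr hc,
        if_neg (by simp [List.count_eq_zero_of_not_mem hm])]

lemma solution_eq_cnt (topping : List Int) : solution topping = cnt [] topping := by
  unfold solution
  rw [aCount_eq_counter]
  have h := a_loop topping [] 0 (PySem.Dict.counter topping) (counter_inv topping)
  have hnil : PySem.Set.ofList ([] : List Int) = PySem.Set.empty := rfl
  rw [hnil] at h
  rw [h]; ring

-- B side: the backward pass computes (set of the suffix, distinct counts of all suffixes)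
lemma rightTable_fst (l : List Int) :
    (rightTable l).1 = PySem.Set.ofList l.reverse := by
  induction l with
  | nil => rfl
  | cons t rest ih =>
      show PySem.Set.add (rightTable rest).1 t = _
      rw [ih, List.reverse_cons, ofList_append_singleton]

lemma rightTable_head (l : List Int) :
    ∃ tl, (rightTable l).2 = ((sdc l : Int)) :: tl := by
  cases l with
  | nil => exact ⟨[], rfl⟩
  | cons t rest =>
      refine ⟨(rightTable rest).2, ?_⟩
      show (((PySem.Set.add (rightTable rest).1 t).length : Int)) :: _ = _
      have h1 : PySem.Set.add (rightTable rest).1 t = PySem.Set.ofList ((t :: rest).reverse) := by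
        rw [rightTable_fst, List.reverse_cons, ofList_append_singleton]
      have h2 : (PySem.Set.ofList ((t :: rest).reverse)).length = sdc (t :: rest) := by
        show sdc ((t :: rest).reverse) = sdc (t :: rest)
        exact sdc_perm (List.reverse_perm (t :: rest))
      rw [h1, h2]

lemma b_loop (s : List Int) : ∀ (p : List Int) (a : Int),
    ((s.zip ((rightTable s).2.drop 1)).foldl bStep (a, PySem.Set.ofList p)).1 = a + cnt p s := by
  induction s with
  | nil => intro p a; simp [cnt]
  | cons t s ih =>
      intro p a
      have hdrop : (rightTable (t :: s)).2.drop 1 = (rightTable s).2 := rfl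
      obtain ⟨tl, htl⟩ := rightTable_head s
      have hzip : (t :: s).zip ((rightTable (t :: s)).2.drop 1) =
          (t, (sdc s : Int)) :: s.zip tl := by
        rw [hdrop, htl]; rfl
      have htlz : s.zip tl = s.zip ((rightTable s).2.drop 1) := by
        rw [htl]; rfl
      rw [hzip, List.foldl_cons, htlz]
      have hstep : bStep (a, PySem.Set.ofList p) (t, (sdc s : Int)) =
          ((if sdc (p ++ [t]) = sdc s then a + 1 else a), PySem.Set.ofList (p ++ [t])) := by
        show ((if ((PySem.Set.add (PySem.Set.ofList p) t).length : Int) = (sdc s : Int)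
                then a + 1 else a), PySem.Set.add (PySem.Set.ofList p) t) = _
        rw [← ofList_append_singleton p t]
        congr 1
        simp only [Nat.cast_inj]
        rfl
      rw [hstep, ih (p ++ [t])]
      have hcnt : cnt p (t :: s) = cnt (p ++ [t]) s + (if sdc (p ++ [t]) = sdc s then 1 else 0) := rfl
      rw [hcnt]
      by_cases hc : sdc (p ++ [t]) = sdc s <;> simp [hc] <;> ring

lemma solution_alt_eq_cnt (topping : List Int) : solution_alt topping = cnt [] topping := by
  unfold solution_alt
  have h := b_loop topping [] 0
  have hnil : PySem.Set.ofList ([] : List Int) = PySem.Set.empty := rfl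
  rw [hnil] at h
  rw [h]; ring

-- ===== VERDICT (by name: the statement is the Claim_ definition above) =====
theorem solution_spec : Claim_equal_solution := by
  intro topping _
  show solution topping = solution_alt topping
  rw [solution_eq_cnt, solution_alt_eq_cnt]
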